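-- pv_equiv track=rewrite | github.com/kev-odin/laughing-waddle | week_1/week1_session2a.py | convert
-- ===== SOURCE A (Python) =====
-- def palindrome(s: str):
--     if len(s) <= 1:
--         return True
--     if s[0] != s[-1]:
--         return False
--     return palindrome(s[1 : len(s) - 1])
--
-- def convert(s: str):
--     s = s.replace(" ", "").lower()
--     new_str = []
--     for i in s:
--         if i.isalnum():
--             new_str.append(i)
--
--     s = "".join(new_str)
--     return palindrome(s)
-- ===== SOURCE B (Python) =====
-- def convert(s: str):
--     t = [c for c in s.lower() if c.isalnum()]
--     return t == t[::-1]
-- ===== Notes on version B (the rewrite author's own statement) =====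
-- stated objective: alternative
-- what changed: replaces the recursive-slicing palindrome check (and the redundant space-replace pass) with a single filtering pass and one list-reversal comparison; quadratic slicing disappears but A's early exit on a leading mismatch can win on random strings
import Mathlib
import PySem

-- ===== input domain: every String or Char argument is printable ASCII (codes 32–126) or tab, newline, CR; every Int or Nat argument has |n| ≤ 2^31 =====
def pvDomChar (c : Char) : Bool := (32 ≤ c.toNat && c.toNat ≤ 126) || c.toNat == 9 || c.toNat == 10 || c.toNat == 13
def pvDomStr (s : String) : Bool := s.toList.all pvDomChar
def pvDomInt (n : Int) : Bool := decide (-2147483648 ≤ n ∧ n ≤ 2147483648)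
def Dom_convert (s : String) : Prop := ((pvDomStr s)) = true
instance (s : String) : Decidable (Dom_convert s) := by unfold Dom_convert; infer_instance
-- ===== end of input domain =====

-- B replaces A's recursive-slicing palindrome check (and the redundant space-replace pass)
-- by one filtering pass and a single reversal comparison (objective: alternative).

-- ===== PORT A =====
-- helper `palindrome` of A, on the string's character list (strings are ported on the list side)
def palA (l : List Char) : Bool :=
  if _h : l.length ≤ 1 then true
  else if PySem.List.pyGet? l 0 ≠ PySem.List.pyGet? l (-1) then false
  else palA (PySem.List.slice l (some 1) (some ((l.length : Int) - 1)))
termination_by l.length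
decreasing_by
  rw [PySem.List.slice_toNat _ (by omega) (by omega)]
  simp only [List.length_take, List.length_drop]
  omega

def convert (s : String) : Bool :=
  let s1 := (PySem.Str.lower (PySem.Str.replace s " " "")).toList
  let newStr := s1.foldl (fun acc c => if PySem.Chars.isalnum c then acc ++ [c] else acc) []
  palA newStr

-- ===== PORT B =====
def convert_alt (s : String) : Bool :=
  let t := (PySem.Str.lower s).toList.filter (fun c => PySem.Chars.isalnum c)
  t == t.reverse

-- ===== PRECONDITION & SPEC =====
def Spec_convert (s : String) (out : Bool) : Prop := out = convert_alt s
instance (s : String) (out : Bool) : Decidable (Spec_convert s out) := by unfold Spec_convert; infer_instance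

-- ===== CLAIM (what is proved, stated in full; the proofs are below) =====
def Claim_equal_convert : Prop := ∀ (s : String), Dom_convert s → Spec_convert s (convert s)

-- ===== LEMMAS AND PROOFS =====

-- `s.replace(" ", "")` on a single-character pattern is a filter
lemma replace_go_space (fuel : Nat) :
    ∀ (l acc : List Char), l.length ≤ fuel →
      PySem.Chars.replace.go [' '] [] fuel l acc = acc.reverse ++ l.filter (fun c => c ≠ ' ') := by
  induction fuel with
  | zero =>
    intro l acc h
    have : l = [] := List.eq_nil_of_length_eq_zero (by omega)
    subst this; simp [PySem.Chars.replace.go]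
  | succ n ih =>
    intro l acc h
    cases l with
    | nil => simp [PySem.Chars.replace.go]
    | cons c t =>
      by_cases hc : c = ' '
      · subst hc
        have hp : List.isPrefixOf [' '] (' ' :: t) = true := by simp [List.isPrefixOf]
        simp only [PySem.Chars.replace.go, hp, if_pos]
        rw [show List.drop [' '].length (' ' :: t) = t from rfl,
          show ([] : List Char).reverse ++ acc = acc from rfl,
          ih t acc (by simpa using Nat.le_of_succ_le_succ h)]
        simp
      · have hp : List.isPrefixOf [' '] (c :: t) = false := by
          simp [List.isPrefixOf]; exact fun hh => hc hh.symm
        simp only [PySem.Chars.replace.go, hp, Bool.false_eq_true, if_neg, not_false_iff]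
        rw [ih t (c :: acc) (by simpa using Nat.le_of_succ_le_succ h)]
        simp [hc]

lemma replace_space (l : List Char) :
    PySem.Chars.replace l [' '] [] = l.filter (fun c => c ≠ ' ') := by
  rw [PySem.Chars.replace]
  simp only [List.isEmpty_cons, Bool.false_eq_true, if_neg, not_false_iff]
  simpa using replace_go_space l.length l [] le_rfl

-- dropping spaces before lowering+filtering for alphanumerics changes nothing:
-- a space lowers to a space, which is not alphanumeric
lemma filter_lower_filter_space (l : List Char) :
    ((l.filter (fun c => c ≠ ' ')).map PySem.Chars.lowerChar).filter (fun c => PySem.Chars.isalnum c)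
      = (l.map PySem.Chars.lowerChar).filter (fun c => PySem.Chars.isalnum c) := by
  induction l with
  | nil => rfl
  | cons c t ih =>
    simp only [ne_eq, decide_not] at ih ⊢
    by_cases hc : c = ' '
    · subst hc
      have h2 : PySem.Chars.isalnum (PySem.Chars.lowerChar ' ') = false := by decide
      simp [h2, ih]
    · have hcc : (!decide (c = ' ')) = true := by simp [hc]
      simp only [List.filter_cons, hcc, if_true, List.map_cons, ih]

-- A's recursive slicing check computes exactly "the list equals its reverse"
lemma palA_eq_aux (n : Nat) :
    ∀ (l : List Char), l.length ≤ n → palA l = decide (l = l.reverse) := by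
  induction n with
  | zero =>
    intro l h
    have : l = [] := List.eq_nil_of_length_eq_zero (by omega)
    subst this; simp [palA]
  | succ n ih =>
    intro l h
    by_cases h1 : l.length ≤ 1
    · rcases l with _ | ⟨a, t⟩
      · simp [palA]
      · rcases t with _ | ⟨c, u⟩
        · simp [palA]
        · simp at h1
    · -- l has length ≥ 2: decompose as a :: m ++ [b]
      obtain ⟨a, t, rfl⟩ : ∃ a t, l = a :: t := by
        cases l with
        | nil => simp at h1
        | cons a t => exact ⟨a, t, rfl⟩
      obtain ⟨m, b, rfl⟩ : ∃ m b, t = m ++ [b] := by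
        have ht : t ≠ [] := by intro hh; subst hh; simp at h1
        exact ⟨t.dropLast, t.getLast ht, (List.dropLast_append_getLast ht).symm⟩
      have hg0 : PySem.List.pyGet? (a :: (m ++ [b])) 0 = some a := by
        rw [show (0 : Int) = ((0 : Nat) : Int) from rfl, PySem.List.pyGet?_natCast]; rfl
      have hgn : PySem.List.pyGet? (a :: (m ++ [b])) (-1) = some b := by
        simp [PySem.List.pyGet?, PySem.List.pyIdx?]
      have hslice : PySem.List.slice (a :: (m ++ [b])) (some 1)
          (some (((a :: (m ++ [b])).length : Int) - 1)) = m := by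
        rw [PySem.List.slice_toNat _ (by omega) (by simp; omega)]
        have h2 : ((((a :: (m ++ [b])).length : Int) - 1).toNat - (1 : Int).toNat) = m.length := by
          simp
        rw [h2]
        simp
      have hm : palA m = decide (m = m.reverse) := ih m (by simp at h; omega)
      rw [palA]
      rw [dif_neg (by simp)]
      rw [hslice, hm, hg0, hgn]
      by_cases hab : a = b
      · subst hab
        rw [if_neg (by simp)]
        have hrev : (a :: (m ++ [a])).reverse = a :: (m.reverse ++ [a]) := by simp
        apply decide_eq_decide.mpr
        rw [hrev]
        constructor
        · intro hmm; exact congrArg (a :: ·) (by rw [← hmm])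
        · intro hh; injection hh with _ h2; exact (List.append_left_inj [a]).mp h2
      · rw [if_pos (by simp [hab])]
        have hne : ¬ (a :: (m ++ [b]) = (a :: (m ++ [b])).reverse) := by
          have hrev : (a :: (m ++ [b])).reverse = b :: (m.reverse ++ [a]) := by simp
          intro hh
          rw [hrev] at hh
          injection hh with h1 _
          exact hab h1
        exact (decide_eq_false hne).symm

lemma palA_eq (l : List Char) : palA l = decide (l = l.reverse) :=
  palA_eq_aux l.length l le_rfl

-- ===== VERDICT (by name: the statement is the Claim_ definition above) =====
theorem convert_spec : Claim_equal_convert := by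
  intro s _
  have hlist : ((PySem.Str.lower (PySem.Str.replace s " " "")).toList.foldl
      (fun acc c => if PySem.Chars.isalnum c then acc ++ [c] else acc) [])
      = (PySem.Str.lower s).toList.filter (fun c => PySem.Chars.isalnum c) := by
    rw [PySem.List.foldl_append_if (p := fun c => PySem.Chars.isalnum c) (f := fun c => c)]
    simp only [PySem.Str.toList_lower, PySem.Str.toList_replace, List.nil_append]
    rw [show " ".toList = [' '] from rfl, show "".toList = ([] : List Char) from rfl,
      replace_space]
    simp only [PySem.Chars.lower, List.map_id_fun', id]
    have h3 := filter_lower_filter_space s.toList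
    simpa using h3
  unfold Spec_convert convert convert_alt
  show palA ((PySem.Str.lower (PySem.Str.replace s " " "")).toList.foldl
      (fun acc c => if PySem.Chars.isalnum c then acc ++ [c] else acc) [])
    = ((PySem.Str.lower s).toList.filter (fun c => PySem.Chars.isalnum c)
        == ((PySem.Str.lower s).toList.filter (fun c => PySem.Chars.isalnum c)).reverse)
  rw [hlist, palA_eq, beq_eq_decide]
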